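-- pv_equiv track=rewrite | github.com/jostmey/MaxSnippetModelOvarian | dataset/dataplumbing.py | trim_sequences
-- ===== SOURCE A (Python) =====
-- def trim_sequences(sequences, trim_front, trim_rear, min_length):
--   sequences_trim = dict()
--   for sequence, quantity in sequences.items():
--     trim_front_adjusted = trim_front
--     trim_rear_adjusted = trim_rear
--     while len(sequence)-trim_front_adjusted-trim_rear_adjusted < min_length:
--       trim_front_adjusted -= 1
--       trim_rear_adjusted -= 1
--     if trim_front_adjusted < 0:
--       trim_front_adjusted = 0
--     if trim_rear_adjusted < 0:
--       trim_rear_adjusted = 0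
--     if trim_rear_adjusted > 0:
--       sequence_trim = sequence[trim_front_adjusted:-trim_rear_adjusted]
--     else:
--       sequence_trim = sequence[trim_front_adjusted:]
--     if len(sequence_trim) >= min_length:
--       if sequence_trim not in sequences_trim:
--         sequences_trim[sequence_trim] = quantity
--       else:
--         sequences_trim[sequence_trim] += quantity
--   return sequences_trim
-- ===== SOURCE B (Python) =====
-- def trim_sequences(sequences, trim_front, trim_rear, min_length):
--   # Closed-form trim: the while loop in the original shrinks both trims by 1
--   # per step until the remaining length reaches min_length; that is ceil(excess/2).
--   def trim(sequence):
--     excess = min_length - (len(sequence) - trim_front - trim_rear)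
--     n = (excess + 1) // 2 if excess > 0 else 0
--     front = max(trim_front - n, 0)
--     rear = max(trim_rear - n, 0)
--     return sequence[front:max(len(sequence) - rear, 0)]
--   sequences_trim = dict()
--   for trimmed, quantity in ((trim(s), q) for s, q in sequences.items()):
--     if len(trimmed) >= min_length:
--       sequences_trim[trimmed] = sequences_trim.get(trimmed, 0) + quantity
--   return sequences_trim
-- ===== Notes on version B (the rewrite author's own statement) =====
-- stated objective: faster
-- what changed: The per-item while loop that decrements both trims step by step (O(min_length) iterations per item) is replaced by a closed-form ceil(deficit/2) trim amount, the two slice branches by a single clamped slice seq[front:max(len-rear,0)], and the membership-test dict branch by a get-with-default update over a generator of trimmed items.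
import Mathlib
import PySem

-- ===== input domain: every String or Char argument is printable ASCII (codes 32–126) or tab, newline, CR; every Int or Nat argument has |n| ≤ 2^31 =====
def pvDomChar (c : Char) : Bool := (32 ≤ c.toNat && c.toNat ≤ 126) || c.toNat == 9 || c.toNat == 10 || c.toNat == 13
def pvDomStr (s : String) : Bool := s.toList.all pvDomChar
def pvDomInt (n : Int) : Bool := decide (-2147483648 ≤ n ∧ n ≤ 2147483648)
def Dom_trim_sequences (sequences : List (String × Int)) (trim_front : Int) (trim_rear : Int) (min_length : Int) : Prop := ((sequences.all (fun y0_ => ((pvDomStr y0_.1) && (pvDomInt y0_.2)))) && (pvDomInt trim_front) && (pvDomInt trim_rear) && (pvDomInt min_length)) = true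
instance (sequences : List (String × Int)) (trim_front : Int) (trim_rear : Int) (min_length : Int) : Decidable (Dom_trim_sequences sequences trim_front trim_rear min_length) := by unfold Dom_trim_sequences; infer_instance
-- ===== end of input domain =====

-- B replaces A's step-by-step while loop by a closed-form trim amount (ceil of the
-- length deficit over 2), a single clamped slice in place of A's two slice branches,
-- and a get-with-default dict update in place of A's membership branch; the loop removal is an asymptotic win (measured faster).

-- ===== PORT A =====
-- A's while loop: decrement both trims until the remaining length reaches min_length
def pvWhileA (slen ml tf tr : Int) : Int × Int :=
  if slen - tf - tr < ml then pvWhileA slen ml (tf - 1) (tr - 1)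
  else (tf, tr)
termination_by (ml - (slen - tf - tr)).toNat
decreasing_by omega

def trim_sequences (sequences : List (String × Int)) (trim_front : Int) (trim_rear : Int) (min_length : Int) : List (String × Int) :=
  (sequences.foldl (fun (d : PySem.Dict String Int) p =>
    let tfa0 := (pvWhileA (PySem.Str.len p.1) min_length trim_front trim_rear).1
    let tra0 := (pvWhileA (PySem.Str.len p.1) min_length trim_front trim_rear).2
    let tfa := if tfa0 < 0 then 0 else tfa0
    let tra := if tra0 < 0 then 0 else tra0
    let st := if tra > 0 then PySem.Str.slice p.1 (some tfa) (some (-tra))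
              else PySem.Str.slice p.1 (some tfa) none
    if min_length ≤ PySem.Str.len st then
      if (d.get? st).isNone then d.insert st p.2 else d.insert st (d.getD st 0 + p.2)
    else d) PySem.Dict.empty).items

-- ===== PORT B =====
-- B's helper `trim`: closed-form trim amount, one clamped slice
def pvTrimB (tf tr ml : Int) (s : String) : String :=
  let len := PySem.Str.len s
  let excess := ml - (len - tf - tr)
  let n := if 0 < excess then PySem.Int.floordiv (excess + 1) 2 else 0
  let front := max (tf - n) 0
  let rear := max (tr - n) 0
  PySem.Str.slice s (some front) (some (max (len - rear) 0))

def trim_sequences_alt (sequences : List (String × Int)) (trim_front : Int) (trim_rear : Int) (min_length : Int) : List (String × Int) :=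
  ((sequences.map (fun p => (pvTrimB trim_front trim_rear min_length p.1, p.2))).foldl
    (fun (d : PySem.Dict String Int) p =>
      if min_length ≤ PySem.Str.len p.1 then d.insert p.1 (d.getD p.1 0 + p.2) else d)
    PySem.Dict.empty).items

-- ===== PRECONDITION & SPEC =====
def Spec_trim_sequences (sequences : List (String × Int)) (trim_front : Int) (trim_rear : Int) (min_length : Int) (out : List (String × Int)) : Prop := out = trim_sequences_alt sequences trim_front trim_rear min_length
instance (sequences : List (String × Int)) (trim_front : Int) (trim_rear : Int) (min_length : Int) (out : List (String × Int)) : Decidable (Spec_trim_sequences sequences trim_front trim_rear min_length out) := by unfold Spec_trim_sequences; infer_instance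

-- ===== CLAIM (what is proved, stated in full; the proofs are below) =====
def Claim_equal_trim_sequences : Prop := ∀ (sequences : List (String × Int)) (trim_front : Int) (trim_rear : Int) (min_length : Int), Dom_trim_sequences sequences trim_front trim_rear min_length → Spec_trim_sequences sequences trim_front trim_rear min_length (trim_sequences sequences trim_front trim_rear min_length)

-- ===== LEMMAS AND PROOFS =====

-- the trim amount A's while loop computes, in closed form
def pvK (slen ml tf tr : Int) : Int :=
  if 0 < ml - (slen - tf - tr) then (ml - (slen - tf - tr) + 1) / 2 else 0

theorem pvWhileA_eq (slen ml tf tr : Int) :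
    pvWhileA slen ml tf tr = (tf - pvK slen ml tf tr, tr - pvK slen ml tf tr) := by
  fun_induction pvWhileA with
  | case1 tf tr h ih =>
    rw [ih]; unfold pvK
    split_ifs <;> refine Prod.ext ?_ ?_ <;> simp <;> omega
  | case2 tf tr h =>
    unfold pvK
    split_ifs with h1
    · omega
    · simp

theorem clampIdx_neg_eq (n : Nat) (R : Int) (h : 0 < R) :
    PySem.List.clampIdx n (-R) = PySem.List.clampIdx n (max ((n:Int) - R) 0) := by
  unfold PySem.List.clampIdx; split_ifs <;> omega

theorem clampIdx_full (n : Nat) (R : Int) (h : ¬ 0 < R) :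
    PySem.List.clampIdx n (max ((n:Int) - max R 0) 0) = n := by
  unfold PySem.List.clampIdx; split_ifs <;> omega

theorem lslice (xs : List Char) (F R : Int) :
    (if (if R < 0 then 0 else R) > 0
     then PySem.List.slice xs (some (if F < 0 then 0 else F)) (some (-(if R < 0 then 0 else R)))
     else PySem.List.slice xs (some (if F < 0 then 0 else F)) none)
    = PySem.List.slice xs (some (max F 0)) (some (max ((xs.length:Int) - max R 0) 0)) := by
  have hF : (if F < 0 then (0:Int) else F) = max F 0 := by split_ifs <;> omega
  have hR : (if R < 0 then (0:Int) else R) = max R 0 := by split_ifs <;> omega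
  rw [hF, hR]
  by_cases h : 0 < R
  · rw [if_pos (by omega : max R 0 > 0)]
    have hmr : max R 0 = R := by omega
    rw [hmr]
    simp only [PySem.List.slice, clampIdx_neg_eq xs.length R h]
  · rw [if_neg (by omega : ¬ max R 0 > 0)]
    simp only [PySem.List.slice, clampIdx_full xs.length R h]

-- A's per-item trimmed string equals B's helper
theorem item_eq (tf tr ml : Int) (s : String) :
    (let tfa0 := (pvWhileA (PySem.Str.len s) ml tf tr).1
     let tra0 := (pvWhileA (PySem.Str.len s) ml tf tr).2
     let tfa := if tfa0 < 0 then 0 else tfa0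
     let tra := if tra0 < 0 then 0 else tra0
     if tra > 0 then PySem.Str.slice s (some tfa) (some (-tra))
     else PySem.Str.slice s (some tfa) none) = pvTrimB tf tr ml s := by
  rw [pvWhileA_eq]
  unfold pvTrimB
  have hfd : PySem.Int.floordiv (ml - (PySem.Str.len s - tf - tr) + 1) 2
      = (ml - (PySem.Str.len s - tf - tr) + 1) / 2 := by
    simp [PySem.Int.floordiv, Int.fdiv_eq_ediv]
  simp only [hfd]
  have hk : (if 0 < ml - (PySem.Str.len s - tf - tr)
      then (ml - (PySem.Str.len s - tf - tr) + 1) / 2 else 0)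
      = pvK (PySem.Str.len s) ml tf tr := rfl
  rw [hk]
  apply String.toList_inj.mp
  have := lslice s.toList (tf - pvK (PySem.Str.len s) ml tf tr) (tr - pvK (PySem.Str.len s) ml tf tr)
  simp only [PySem.Str.slice, String.toList_ofList, PySem.Chars.slice_eq_listSlice,
    PySem.Str.len_eq, apply_ite String.toList] at *
  convert this using 4

-- A's membership-branch dict update equals B's get-with-default update
theorem dstep (d : PySem.Dict String Int) (st : String) (q : Int) :
    (if (d.get? st).isNone then d.insert st q else d.insert st (d.getD st 0 + q))
    = d.insert st (d.getD st 0 + q) := by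
  cases h : d.get? st <;> simp [PySem.Dict.getD, h]

theorem trim_sequences_eq (sequences : List (String × Int)) (tf tr ml : Int) :
    trim_sequences sequences tf tr ml = trim_sequences_alt sequences tf tr ml := by
  unfold trim_sequences trim_sequences_alt
  rw [List.foldl_map]
  congr 1
  congr 1
  funext d p
  simp only []
  rw [item_eq tf tr ml p.1, dstep]

-- ===== VERDICT (by name: the statement is the Claim_ definition above) =====
theorem trim_sequences_spec : Claim_equal_trim_sequences := by
  intro s tf tr ml _
  exact trim_sequences_eq s tf tr ml
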